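-- pv_equiv track=rewrite | github.com/dbphx/waf-dl | src/deep_learning/augment_data.py | categorize_attack
-- ===== SOURCE A (Python) =====
-- def categorize_attack(attack_type, payload=""):
--     attack_type = attack_type.lower()
--     payload_lower = payload.lower()
--
--     if 'sql' in attack_type:
--         return 'sqli'
--     elif 'xss' in attack_type or 'cross-site' in attack_type:
--         return 'xss'
--     elif 'lfi' in attack_type or 'local file inclusion' in attack_type:
--         return 'lfi'
--     elif 'rce' in attack_type or 'command injection' in attack_type or 'execution' in attack_type:
--         return 'rce'
--     elif 'traversal' in attack_type or 'directory traversal' in attack_type: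
--         return 'traversal'
--     elif 'upload' in attack_type:
--         return 'upload'
--
--     # Heuristics based on payload contents if prefix is generic (e.g. Attack_PDF)
--     if any(k in payload_lower for k in ['script', 'alert(', 'onerror=', 'onload=', 'prompt(', 'confirm(', 'svg', 'javascript:', 'onmouseover=', 'onmouseenter=', 'onfocus=', 'onauxclick=', 'onpointer']):
--         return 'xss'
--     if any(k in payload_lower for k in ['select ', 'union ', 'waitfor ', 'sleep(', 'or 1=1', "or '1'='1", 'drop table', 'information_schema', 'json_extract']):
--         return 'sqli'
--     if any(k in payload_lower for k in ['/etc/passwd', 'boot.ini', 'win.ini']):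
--         return 'lfi'
--     if any(k in payload_lower for k in ['../', '..%2f', '..%c0%af', '..\\']):
--         return 'traversal'
--     if any(k in payload_lower for k in ['; cat', '| ls', '$(whoami)', '`id`', 'wget ', 'curl ', 'exec cmd', 'ping ', 'whoami', '| set /a']):
--         return 'rce'
--
--     return 'other'
-- ===== SOURCE B (Python) =====
-- # Different algorithm: flatten all rules into one keyword-level priority table,
-- # compute every match, and select the best (minimum-priority) one with min().
-- _RULES = [
--     ('sqli', True, ['sql']),
--     ('xss', True, ['xss', 'cross-site']),
--     ('lfi', True, ['lfi', 'local file inclusion']),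
--     ('rce', True, ['rce', 'command injection', 'execution']),
--     ('traversal', True, ['traversal', 'directory traversal']),
--     ('upload', True, ['upload']),
--     ('xss', False, ['script', 'alert(', 'onerror=', 'onload=', 'prompt(', 'confirm(', 'svg', 'javascript:', 'onmouseover=', 'onmouseenter=', 'onfocus=', 'onauxclick=', 'onpointer']),
--     ('sqli', False, ['select ', 'union ', 'waitfor ', 'sleep(', 'or 1=1', "or '1'='1", 'drop table', 'information_schema', 'json_extract']),
--     ('lfi', False, ['/etc/passwd', 'boot.ini', 'win.ini']),
--     ('traversal', False, ['../', '..%2f', '..%c0%af', '..\\']),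
--     ('rce', False, ['; cat', '| ls', '$(whoami)', '`id`', 'wget ', 'curl ', 'exec cmd', 'ping ', 'whoami', '| set /a']),
-- ]
-- KEYWORDS = [(prio, cat, is_type, kw)
--             for prio, (cat, is_type, kws) in enumerate(_RULES)
--             for kw in kws]
--
-- def categorize_attack(attack_type, payload=""):
--     t = attack_type.lower()
--     p = payload.lower()
--     best = min(((prio, cat) for prio, cat, is_type, kw in KEYWORDS
--                 if kw in (t if is_type else p)), default=None)
--     return best[1] if best is not None else 'other'
-- ===== Notes on version B (the rewrite author's own statement) =====
-- stated objective: alternative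
-- what changed: Instead of an ordered first-match if/elif chain, B flattens all rules into one keyword-level (priority, category) table, computes every matching keyword, and selects the winner with min() over priorities.
import Mathlib
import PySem

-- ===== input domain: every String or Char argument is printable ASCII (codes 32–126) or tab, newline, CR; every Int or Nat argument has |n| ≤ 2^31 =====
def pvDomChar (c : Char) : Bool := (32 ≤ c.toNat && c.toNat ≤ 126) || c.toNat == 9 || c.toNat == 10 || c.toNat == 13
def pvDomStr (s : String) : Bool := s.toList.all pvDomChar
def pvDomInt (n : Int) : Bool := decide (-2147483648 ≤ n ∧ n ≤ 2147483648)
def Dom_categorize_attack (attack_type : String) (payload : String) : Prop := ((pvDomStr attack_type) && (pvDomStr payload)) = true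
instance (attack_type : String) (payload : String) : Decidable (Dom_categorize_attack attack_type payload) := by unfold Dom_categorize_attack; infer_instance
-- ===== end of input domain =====

-- B replaces A's first-match if/elif chain by a flattened keyword-level priority table:
-- it computes ALL matching keywords and selects the minimum-priority one (alternative algorithm, same cost).

-- ===== PORT A =====
def categorize_attack (attack_type : String) (payload : String) : String :=
  let at_ := PySem.Str.lower attack_type
  let payload_lower := PySem.Str.lower payload
  if PySem.Str.isIn "sql" at_ then "sqli"
  else if PySem.Str.isIn "xss" at_ || PySem.Str.isIn "cross-site" at_ then "xss"
  else if PySem.Str.isIn "lfi" at_ || PySem.Str.isIn "local file inclusion" at_ then "lfi"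
  else if PySem.Str.isIn "rce" at_ || PySem.Str.isIn "command injection" at_ || PySem.Str.isIn "execution" at_ then "rce"
  else if PySem.Str.isIn "traversal" at_ || PySem.Str.isIn "directory traversal" at_ then "traversal"
  else if PySem.Str.isIn "upload" at_ then "upload"
  else if ["script", "alert(", "onerror=", "onload=", "prompt(", "confirm(", "svg", "javascript:", "onmouseover=", "onmouseenter=", "onfocus=", "onauxclick=", "onpointer"].any (fun k => PySem.Str.isIn k payload_lower) then "xss"
  else if ["select ", "union ", "waitfor ", "sleep(", "or 1=1", "or '1'='1", "drop table", "information_schema", "json_extract"].any (fun k => PySem.Str.isIn k payload_lower) then "sqli"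
  else if ["/etc/passwd", "boot.ini", "win.ini"].any (fun k => PySem.Str.isIn k payload_lower) then "lfi"
  else if ["../", "..%2f", "..%c0%af", "..\\"].any (fun k => PySem.Str.isIn k payload_lower) then "traversal"
  else if ["; cat", "| ls", "$(whoami)", "`id`", "wget ", "curl ", "exec cmd", "ping ", "whoami", "| set /a"].any (fun k => PySem.Str.isIn k payload_lower) then "rce"
  else "other"

-- ===== PORT B =====
-- Source B's flattened KEYWORDS table: (priority, category, is_type, keyword), one entry per keyword
def pvKeywords : List (Nat × String × Bool × String) :=
  [ (0, "sqli", true, "sql"),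
    (1, "xss", true, "xss"), (1, "xss", true, "cross-site"),
    (2, "lfi", true, "lfi"), (2, "lfi", true, "local file inclusion"),
    (3, "rce", true, "rce"), (3, "rce", true, "command injection"), (3, "rce", true, "execution"),
    (4, "traversal", true, "traversal"), (4, "traversal", true, "directory traversal"),
    (5, "upload", true, "upload"),
    (6, "xss", false, "script"), (6, "xss", false, "alert("), (6, "xss", false, "onerror="),
    (6, "xss", false, "onload="), (6, "xss", false, "prompt("), (6, "xss", false, "confirm("),
    (6, "xss", false, "svg"), (6, "xss", false, "javascript:"), (6, "xss", false, "onmouseover="),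
    (6, "xss", false, "onmouseenter="), (6, "xss", false, "onfocus="), (6, "xss", false, "onauxclick="),
    (6, "xss", false, "onpointer"),
    (7, "sqli", false, "select "), (7, "sqli", false, "union "), (7, "sqli", false, "waitfor "),
    (7, "sqli", false, "sleep("), (7, "sqli", false, "or 1=1"), (7, "sqli", false, "or '1'='1"),
    (7, "sqli", false, "drop table"), (7, "sqli", false, "information_schema"), (7, "sqli", false, "json_extract"),
    (8, "lfi", false, "/etc/passwd"), (8, "lfi", false, "boot.ini"), (8, "lfi", false, "win.ini"),
    (9, "traversal", false, "../"), (9, "traversal", false, "..%2f"), (9, "traversal", false, "..%c0%af"),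
    (9, "traversal", false, "..\\"),
    (10, "rce", false, "; cat"), (10, "rce", false, "| ls"), (10, "rce", false, "$(whoami)"),
    (10, "rce", false, "`id`"), (10, "rce", false, "wget "), (10, "rce", false, "curl "),
    (10, "rce", false, "exec cmd"), (10, "rce", false, "ping "), (10, "rce", false, "whoami"),
    (10, "rce", false, "| set /a") ]

-- the generator's condition: this keyword entry matches (keyword is a substring of the selected string)
def pvMatch (t p : String) (e : Nat × String × Bool × String) : Bool :=
  PySem.Str.isIn e.2.2.2 (if e.2.2.1 then t else p)

-- Python's min over (prio, cat) pairs compares lexicographically; entries of pvKeywords with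
-- equal priority carry the same category, so comparing priorities alone (keeping the first on a
-- tie, as min does) is exact here.
def pvMinBy : (Nat × String × Bool × String) → List (Nat × String × Bool × String) → (Nat × String × Bool × String)
  | b, [] => b
  | b, x :: rest => pvMinBy (if x.1 < b.1 then x else b) rest

def categorize_attack_alt (attack_type : String) (payload : String) : String :=
  let t := PySem.Str.lower attack_type
  let p := PySem.Str.lower payload
  match pvKeywords.filter (pvMatch t p) with
  | [] => "other"
  | h :: rest => (pvMinBy h rest).2.1

-- ===== PRECONDITION & SPEC =====
def Spec_categorize_attack (attack_type : String) (payload : String) (out : String) : Prop := out = categorize_attack_alt attack_type payload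
instance (attack_type : String) (payload : String) (out : String) : Decidable (Spec_categorize_attack attack_type payload out) := by unfold Spec_categorize_attack; infer_instance

-- ===== CLAIM (what is proved, stated in full; the proofs are below) =====
def Claim_equal_categorize_attack : Prop := ∀ (attack_type : String) (payload : String), Dom_categorize_attack attack_type payload → Spec_categorize_attack attack_type payload (categorize_attack attack_type payload)

-- ===== LEMMAS AND PROOFS =====

-- when the head is already minimal, the min-fold returns it
theorem pvMinBy_head (h : Nat × String × Bool × String) (l : List (Nat × String × Bool × String))
    (hmin : ∀ x ∈ l, ¬ x.1 < h.1) : pvMinBy h l = h := by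
  induction l with
  | nil => rfl
  | cons x rest ih =>
      simp only [pvMinBy]
      rw [if_neg (hmin x (by simp))]
      exact ih (fun y hy => hmin y (by simp [hy]))

-- priorities in pvKeywords are nondecreasing
theorem pvKeywords_sorted : pvKeywords.Pairwise (fun a b => a.1 ≤ b.1) := by decide

-- B's min-over-filter equals the first match of the table
theorem alt_eq_find (t p : String) :
    categorize_attack_alt t p =
      match pvKeywords.find? (pvMatch (PySem.Str.lower t) (PySem.Str.lower p)) with
      | none => "other"
      | some e => e.2.1 := by
  unfold categorize_attack_alt
  have hs : (pvKeywords.filter (pvMatch (PySem.Str.lower t) (PySem.Str.lower p))).Pairwise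
      (fun a b => a.1 ≤ b.1) := pvKeywords_sorted.filter _
  rw [← List.head?_filter]
  cases hf : pvKeywords.filter (pvMatch (PySem.Str.lower t) (PySem.Str.lower p)) with
  | nil => simp only [hf, List.head?]
  | cons h rest =>
      rw [hf] at hs
      simp only [hf, List.head?]
      rw [pvMinBy_head h rest (fun x hx => by
        have := (List.pairwise_cons.1 hs).1 x hx; omega)]

theorem categorize_attack_spec : Claim_equal_categorize_attack := by
  intro attack_type payload _
  unfold Spec_categorize_attack
  rw [alt_eq_find]
  unfold categorize_attack
  simp only [pvKeywords, pvMatch, List.find?, List.any_cons, List.any_nil]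
  by_cases h1 : PySem.Str.isIn "sql" (PySem.Str.lower attack_type) = true <;>
    simp only [h1, Bool.true_or, Bool.or_true, Bool.false_or, Bool.or_false, if_true, if_false, Bool.false_eq_true]
  by_cases h2 : PySem.Str.isIn "xss" (PySem.Str.lower attack_type) = true <;>
    simp only [h2, Bool.true_or, Bool.or_true, Bool.false_or, Bool.or_false, if_true, if_false, Bool.false_eq_true]
  by_cases h3 : PySem.Str.isIn "cross-site" (PySem.Str.lower attack_type) = true <;>
    simp only [h3, Bool.true_or, Bool.or_true, Bool.false_or, Bool.or_false, if_true, if_false, Bool.false_eq_true]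
  by_cases h4 : PySem.Str.isIn "lfi" (PySem.Str.lower attack_type) = true <;>
    simp only [h4, Bool.true_or, Bool.or_true, Bool.false_or, Bool.or_false, if_true, if_false, Bool.false_eq_true]
  by_cases h5 : PySem.Str.isIn "local file inclusion" (PySem.Str.lower attack_type) = true <;>
    simp only [h5, Bool.true_or, Bool.or_true, Bool.false_or, Bool.or_false, if_true, if_false, Bool.false_eq_true]
  by_cases h6 : PySem.Str.isIn "rce" (PySem.Str.lower attack_type) = true <;>
    simp only [h6, Bool.true_or, Bool.or_true, Bool.false_or, Bool.or_false, if_true, if_false, Bool.false_eq_true]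
  by_cases h7 : PySem.Str.isIn "command injection" (PySem.Str.lower attack_type) = true <;>
    simp only [h7, Bool.true_or, Bool.or_true, Bool.false_or, Bool.or_false, if_true, if_false, Bool.false_eq_true]
  by_cases h8 : PySem.Str.isIn "execution" (PySem.Str.lower attack_type) = true <;>
    simp only [h8, Bool.true_or, Bool.or_true, Bool.false_or, Bool.or_false, if_true, if_false, Bool.false_eq_true]
  by_cases h9 : PySem.Str.isIn "traversal" (PySem.Str.lower attack_type) = true <;>
    simp only [h9, Bool.true_or, Bool.or_true, Bool.false_or, Bool.or_false, if_true, if_false, Bool.false_eq_true]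
  by_cases h10 : PySem.Str.isIn "directory traversal" (PySem.Str.lower attack_type) = true <;>
    simp only [h10, Bool.true_or, Bool.or_true, Bool.false_or, Bool.or_false, if_true, if_false, Bool.false_eq_true]
  by_cases h11 : PySem.Str.isIn "upload" (PySem.Str.lower attack_type) = true <;>
    simp only [h11, Bool.true_or, Bool.or_true, Bool.false_or, Bool.or_false, if_true, if_false, Bool.false_eq_true]
  by_cases h12 : PySem.Str.isIn "script" (PySem.Str.lower payload) = true <;>
    simp only [h12, Bool.true_or, Bool.or_true, Bool.false_or, Bool.or_false, if_true, if_false, Bool.false_eq_true]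
  by_cases h13 : PySem.Str.isIn "alert(" (PySem.Str.lower payload) = true <;>
    simp only [h13, Bool.true_or, Bool.or_true, Bool.false_or, Bool.or_false, if_true, if_false, Bool.false_eq_true]
  by_cases h14 : PySem.Str.isIn "onerror=" (PySem.Str.lower payload) = true <;>
    simp only [h14, Bool.true_or, Bool.or_true, Bool.false_or, Bool.or_false, if_true, if_false, Bool.false_eq_true]
  by_cases h15 : PySem.Str.isIn "onload=" (PySem.Str.lower payload) = true <;>
    simp only [h15, Bool.true_or, Bool.or_true, Bool.false_or, Bool.or_false, if_true, if_false, Bool.false_eq_true]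
  by_cases h16 : PySem.Str.isIn "prompt(" (PySem.Str.lower payload) = true <;>
    simp only [h16, Bool.true_or, Bool.or_true, Bool.false_or, Bool.or_false, if_true, if_false, Bool.false_eq_true]
  by_cases h17 : PySem.Str.isIn "confirm(" (PySem.Str.lower payload) = true <;>
    simp only [h17, Bool.true_or, Bool.or_true, Bool.false_or, Bool.or_false, if_true, if_false, Bool.false_eq_true]
  by_cases h18 : PySem.Str.isIn "svg" (PySem.Str.lower payload) = true <;>
    simp only [h18, Bool.true_or, Bool.or_true, Bool.false_or, Bool.or_false, if_true, if_false, Bool.false_eq_true]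
  by_cases h19 : PySem.Str.isIn "javascript:" (PySem.Str.lower payload) = true <;>
    simp only [h19, Bool.true_or, Bool.or_true, Bool.false_or, Bool.or_false, if_true, if_false, Bool.false_eq_true]
  by_cases h20 : PySem.Str.isIn "onmouseover=" (PySem.Str.lower payload) = true <;>
    simp only [h20, Bool.true_or, Bool.or_true, Bool.false_or, Bool.or_false, if_true, if_false, Bool.false_eq_true]
  by_cases h21 : PySem.Str.isIn "onmouseenter=" (PySem.Str.lower payload) = true <;>
    simp only [h21, Bool.true_or, Bool.or_true, Bool.false_or, Bool.or_false, if_true, if_false, Bool.false_eq_true]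
  by_cases h22 : PySem.Str.isIn "onfocus=" (PySem.Str.lower payload) = true <;>
    simp only [h22, Bool.true_or, Bool.or_true, Bool.false_or, Bool.or_false, if_true, if_false, Bool.false_eq_true]
  by_cases h23 : PySem.Str.isIn "onauxclick=" (PySem.Str.lower payload) = true <;>
    simp only [h23, Bool.true_or, Bool.or_true, Bool.false_or, Bool.or_false, if_true, if_false, Bool.false_eq_true]
  by_cases h24 : PySem.Str.isIn "onpointer" (PySem.Str.lower payload) = true <;>
    simp only [h24, Bool.true_or, Bool.or_true, Bool.false_or, Bool.or_false, if_true, if_false, Bool.false_eq_true]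
  by_cases h25 : PySem.Str.isIn "select " (PySem.Str.lower payload) = true <;>
    simp only [h25, Bool.true_or, Bool.or_true, Bool.false_or, Bool.or_false, if_true, if_false, Bool.false_eq_true]
  by_cases h26 : PySem.Str.isIn "union " (PySem.Str.lower payload) = true <;>
    simp only [h26, Bool.true_or, Bool.or_true, Bool.false_or, Bool.or_false, if_true, if_false, Bool.false_eq_true]
  by_cases h27 : PySem.Str.isIn "waitfor " (PySem.Str.lower payload) = true <;>
    simp only [h27, Bool.true_or, Bool.or_true, Bool.false_or, Bool.or_false, if_true, if_false, Bool.false_eq_true]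
  by_cases h28 : PySem.Str.isIn "sleep(" (PySem.Str.lower payload) = true <;>
    simp only [h28, Bool.true_or, Bool.or_true, Bool.false_or, Bool.or_false, if_true, if_false, Bool.false_eq_true]
  by_cases h29 : PySem.Str.isIn "or 1=1" (PySem.Str.lower payload) = true <;>
    simp only [h29, Bool.true_or, Bool.or_true, Bool.false_or, Bool.or_false, if_true, if_false, Bool.false_eq_true]
  by_cases h30 : PySem.Str.isIn "or '1'='1" (PySem.Str.lower payload) = true <;>
    simp only [h30, Bool.true_or, Bool.or_true, Bool.false_or, Bool.or_false, if_true, if_false, Bool.false_eq_true]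
  by_cases h31 : PySem.Str.isIn "drop table" (PySem.Str.lower payload) = true <;>
    simp only [h31, Bool.true_or, Bool.or_true, Bool.false_or, Bool.or_false, if_true, if_false, Bool.false_eq_true]
  by_cases h32 : PySem.Str.isIn "information_schema" (PySem.Str.lower payload) = true <;>
    simp only [h32, Bool.true_or, Bool.or_true, Bool.false_or, Bool.or_false, if_true, if_false, Bool.false_eq_true]
  by_cases h33 : PySem.Str.isIn "json_extract" (PySem.Str.lower payload) = true <;>
    simp only [h33, Bool.true_or, Bool.or_true, Bool.false_or, Bool.or_false, if_true, if_false, Bool.false_eq_true]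
  by_cases h34 : PySem.Str.isIn "/etc/passwd" (PySem.Str.lower payload) = true <;>
    simp only [h34, Bool.true_or, Bool.or_true, Bool.false_or, Bool.or_false, if_true, if_false, Bool.false_eq_true]
  by_cases h35 : PySem.Str.isIn "boot.ini" (PySem.Str.lower payload) = true <;>
    simp only [h35, Bool.true_or, Bool.or_true, Bool.false_or, Bool.or_false, if_true, if_false, Bool.false_eq_true]
  by_cases h36 : PySem.Str.isIn "win.ini" (PySem.Str.lower payload) = true <;>
    simp only [h36, Bool.true_or, Bool.or_true, Bool.false_or, Bool.or_false, if_true, if_false, Bool.false_eq_true]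
  by_cases h37 : PySem.Str.isIn "../" (PySem.Str.lower payload) = true <;>
    simp only [h37, Bool.true_or, Bool.or_true, Bool.false_or, Bool.or_false, if_true, if_false, Bool.false_eq_true]
  by_cases h38 : PySem.Str.isIn "..%2f" (PySem.Str.lower payload) = true <;>
    simp only [h38, Bool.true_or, Bool.or_true, Bool.false_or, Bool.or_false, if_true, if_false, Bool.false_eq_true]
  by_cases h39 : PySem.Str.isIn "..%c0%af" (PySem.Str.lower payload) = true <;>
    simp only [h39, Bool.true_or, Bool.or_true, Bool.false_or, Bool.or_false, if_true, if_false, Bool.false_eq_true]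
  by_cases h40 : PySem.Str.isIn "..\\" (PySem.Str.lower payload) = true <;>
    simp only [h40, Bool.true_or, Bool.or_true, Bool.false_or, Bool.or_false, if_true, if_false, Bool.false_eq_true]
  by_cases h41 : PySem.Str.isIn "; cat" (PySem.Str.lower payload) = true <;>
    simp only [h41, Bool.true_or, Bool.or_true, Bool.false_or, Bool.or_false, if_true, if_false, Bool.false_eq_true]
  by_cases h42 : PySem.Str.isIn "| ls" (PySem.Str.lower payload) = true <;>
    simp only [h42, Bool.true_or, Bool.or_true, Bool.false_or, Bool.or_false, if_true, if_false, Bool.false_eq_true]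
  by_cases h43 : PySem.Str.isIn "$(whoami)" (PySem.Str.lower payload) = true <;>
    simp only [h43, Bool.true_or, Bool.or_true, Bool.false_or, Bool.or_false, if_true, if_false, Bool.false_eq_true]
  by_cases h44 : PySem.Str.isIn "`id`" (PySem.Str.lower payload) = true <;>
    simp only [h44, Bool.true_or, Bool.or_true, Bool.false_or, Bool.or_false, if_true, if_false, Bool.false_eq_true]
  by_cases h45 : PySem.Str.isIn "wget " (PySem.Str.lower payload) = true <;>
    simp only [h45, Bool.true_or, Bool.or_true, Bool.false_or, Bool.or_false, if_true, if_false, Bool.false_eq_true]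
  by_cases h46 : PySem.Str.isIn "curl " (PySem.Str.lower payload) = true <;>
    simp only [h46, Bool.true_or, Bool.or_true, Bool.false_or, Bool.or_false, if_true, if_false, Bool.false_eq_true]
  by_cases h47 : PySem.Str.isIn "exec cmd" (PySem.Str.lower payload) = true <;>
    simp only [h47, Bool.true_or, Bool.or_true, Bool.false_or, Bool.or_false, if_true, if_false, Bool.false_eq_true]
  by_cases h48 : PySem.Str.isIn "ping " (PySem.Str.lower payload) = true <;>
    simp only [h48, Bool.true_or, Bool.or_true, Bool.false_or, Bool.or_false, if_true, if_false, Bool.false_eq_true]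
  by_cases h49 : PySem.Str.isIn "whoami" (PySem.Str.lower payload) = true <;>
    simp only [h49, Bool.true_or, Bool.or_true, Bool.false_or, Bool.or_false, if_true, if_false, Bool.false_eq_true]
  by_cases h50 : PySem.Str.isIn "| set /a" (PySem.Str.lower payload) = true <;>
    simp only [h50, Bool.true_or, Bool.or_true, Bool.false_or, Bool.or_false, if_true, if_false, Bool.false_eq_true]
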